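-- pv_equiv track=rewrite | github.com/morgoth1145/advent-of-code | 2021/22/solution.py | count_uninterrupted
-- ===== SOURCE A (Python) =====
-- def get_subrange(crange, low, high):
--     c0 = crange[0]
--     c1 = crange[-1]
--     if c1 < low:
--         return []
--     elif c0 > high:
--         return []
--     c0 = max(c0, low)
--     c1 = max(c1, low)
--     c0 = min(c0, high)
--     c1 = min(c1, high)
--     return range(c0, c1+1)
--
-- def count_uninterrupted(item, rest):
--     _, xr, yr, zr = item
--     total = len(xr) * len(yr) * len(zr)
--
--     conflicts = []
--     ref_val = 0
--
--     for item in rest: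
--         state, xr2, yr2, zr2 = item
--
--         cxr = get_subrange(xr2, xr[0], xr[-1])
--         cyr = get_subrange(yr2, yr[0], yr[-1])
--         czr = get_subrange(zr2, zr[0], zr[-1])
--
--         if len(cxr) == 0 or len(cyr) == 0 or len(czr) == 0:
--             continue
--
--         conflicts.append((state, cxr, cyr, czr))
--         ref_val += len(cxr) * len(cyr) * len(czr)
--
--     for idx, item in enumerate(conflicts):
--         total -= count_uninterrupted(item, conflicts[idx+1:])
--
--     return total
-- ===== SOURCE B (Python) =====
-- def count_uninterrupted(item, rest):
--     _, xr, yr, zr = item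
--     total = len(xr) * len(yr) * len(zr)
--     lowx, highx = xr[0], xr[-1]
--     lowy, highy = yr[0], yr[-1]
--     lowz, highz = zr[0], zr[-1]
--
--     def clip(c0, c1, low, high):
--         if c1 < low or c0 > high:
--             return None
--         a = min(max(c0, low), high)
--         b = min(max(c1, low), high)
--         if a > b:
--             return None
--         return (a, b)
--
--     def clip_box(it):
--         _, xr2, yr2, zr2 = it
--         bx = clip(xr2[0], xr2[-1], lowx, highx)
--         by = clip(yr2[0], yr2[-1], lowy, highy)
--         bz = clip(zr2[0], zr2[-1], lowz, highz)
--         if bx is None or by is None or bz is None: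
--             return None
--         return (bx, by, bz)
--
--     def vol(b):
--         return (b[0][1] - b[0][0] + 1) * (b[1][1] - b[1][0] + 1) * (b[2][1] - b[2][0] + 1)
--
--     def subtract(d, c):
--         # disjoint pieces of box d lying outside box c
--         (dx0, dx1), (dy0, dy1), (dz0, dz1) = d
--         (cx0, cx1), (cy0, cy1), (cz0, cz1) = c
--         if dx1 < cx0 or cx1 < dx0 or dy1 < cy0 or cy1 < dy0 or dz1 < cz0 or cz1 < dz0:
--             return [d]
--         mx0, mx1 = max(dx0, cx0), min(dx1, cx1)
--         my0, my1 = max(dy0, cy0), min(dy1, cy1)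
--         cands = [
--             ((dx0, cx0 - 1), (dy0, dy1), (dz0, dz1)),
--             ((cx1 + 1, dx1), (dy0, dy1), (dz0, dz1)),
--             ((mx0, mx1), (dy0, cy0 - 1), (dz0, dz1)),
--             ((mx0, mx1), (cy1 + 1, dy1), (dz0, dz1)),
--             ((mx0, mx1), (my0, my1), (dz0, cz0 - 1)),
--             ((mx0, mx1), (my0, my1), (cz1 + 1, dz1)),
--         ]
--         return [b for b in cands
--                 if b[0][0] <= b[0][1] and b[1][0] <= b[1][1] and b[2][0] <= b[2][1]]
--
--     covered_boxes = []
--     covered = 0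
--     for it in rest:
--         c = clip_box(it)
--         if c is None:
--             continue
--         frags = [c]
--         for b in covered_boxes:
--             frags = [p for f in frags for p in subtract(f, b)]
--         for f in frags:
--             covered += vol(f)
--         covered_boxes.extend(frags)
--     return total - covered
-- ===== Notes on version B (the rewrite author's own statement) =====
-- stated objective: faster
-- what changed: A subtracts the overlap volume by an exponential recursion over suffixes of the conflict list; B instead maintains a list of pairwise-disjoint covered boxes, splitting each new clipped cuboid against the boxes already covered (classic AoC-22 box-splitting), and sums their volumes once.
-- outside the precondition, e.g. on count_uninterrupted((0, [], [], []), []): A returns 0, B raises IndexError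
import Mathlib
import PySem

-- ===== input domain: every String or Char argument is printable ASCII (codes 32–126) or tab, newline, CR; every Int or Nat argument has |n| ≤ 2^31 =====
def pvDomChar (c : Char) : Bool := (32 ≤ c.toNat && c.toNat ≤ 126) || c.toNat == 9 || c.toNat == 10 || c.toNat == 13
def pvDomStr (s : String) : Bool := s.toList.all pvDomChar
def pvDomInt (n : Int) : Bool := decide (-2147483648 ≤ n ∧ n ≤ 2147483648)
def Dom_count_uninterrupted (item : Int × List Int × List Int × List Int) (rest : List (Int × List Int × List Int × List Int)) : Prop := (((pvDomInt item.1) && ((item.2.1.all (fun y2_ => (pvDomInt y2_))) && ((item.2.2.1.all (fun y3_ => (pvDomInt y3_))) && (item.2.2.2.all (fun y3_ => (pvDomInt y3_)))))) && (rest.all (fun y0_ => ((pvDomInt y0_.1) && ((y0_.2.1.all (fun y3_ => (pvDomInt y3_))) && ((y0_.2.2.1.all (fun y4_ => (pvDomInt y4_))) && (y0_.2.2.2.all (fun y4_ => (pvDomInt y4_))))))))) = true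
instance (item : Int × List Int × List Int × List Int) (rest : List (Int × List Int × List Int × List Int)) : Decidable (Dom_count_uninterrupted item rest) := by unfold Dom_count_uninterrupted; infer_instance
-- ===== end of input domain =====

-- B replaces A's exponential suffix-recursion over conflicting cuboids by a one-pass sweep
-- keeping a list of pairwise-disjoint covered boxes (box splitting); same return value.

-- ===== PORT A =====
-- xs[0] / xs[-1]; `.getD 0` is unreachable junk: Pre_ excludes empty coordinate lists (Python raises IndexError there)
def pvFirst (xs : List Int) : Int := (PySem.List.pyGet? xs 0).getD 0
def pvLast (xs : List Int) : Int := (PySem.List.pyGet? xs (-1)).getD 0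

def get_subrange (crange : List Int) (low high : Int) : List Int :=
  let c0 := pvFirst crange
  let c1 := pvLast crange
  if c1 < low then []
  else if c0 > high then []
  else
    let c0' := max c0 low
    let c1' := max c1 low
    let c0'' := min c0' high
    let c1'' := min c1' high
    PySem.List.pyRange c0'' (c1'' + 1) 1

-- the body of A's first loop (append-or-continue, written as a filterMap step)
def toConflict (xr yr zr : List Int) (it : Int × List Int × List Int × List Int) :
    Option (Int × List Int × List Int × List Int) :=
  let cxr := get_subrange it.2.1 (pvFirst xr) (pvLast xr)
  let cyr := get_subrange it.2.2.1 (pvFirst yr) (pvLast yr)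
  let czr := get_subrange it.2.2.2 (pvFirst zr) (pvLast zr)
  if cxr.length = 0 ∨ cyr.length = 0 ∨ czr.length = 0 then none
  else some (it.1, cxr, cyr, czr)

-- A's first loop: collect the conflicting sub-cuboids in order
def pvConflicts (xr yr zr : List Int) (rest : List (Int × List Int × List Int × List Int)) :
    List (Int × List Int × List Int × List Int) :=
  rest.filterMap (toConflict xr yr zr)

mutual
-- the `for idx, item in enumerate(conflicts): total -= count_uninterrupted(item, conflicts[idx+1:])` loop
def cuLoop (conflicts : List (Int × List Int × List Int × List Int)) : Int :=
  match conflicts with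
  | [] => 0
  | c :: cs => count_uninterrupted c cs + cuLoop cs
  termination_by (conflicts.length, 0)
  decreasing_by
  · exact Prod.Lex.left _ _ (by simp)
  · exact Prod.Lex.left _ _ (by simp)

def count_uninterrupted (item : Int × List Int × List Int × List Int)
    (rest : List (Int × List Int × List Int × List Int)) : Int :=
  let total : Int := (item.2.1.length : Int) * (item.2.2.1.length : Int) * (item.2.2.2.length : Int)
  total - cuLoop (pvConflicts item.2.1 item.2.2.1 item.2.2.2 rest)
  termination_by (rest.length, 1)
  decreasing_by
    have h : (pvConflicts item.2.1 item.2.2.1 item.2.2.2 rest).length ≤ rest.length :=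
      List.length_filterMap_le (toConflict item.2.1 item.2.2.1 item.2.2.2) rest
    rcases Nat.lt_or_ge (pvConflicts item.2.1 item.2.2.1 item.2.2.2 rest).length rest.length with h' | h'
    · exact Prod.Lex.left _ _ h'
    · have heq : (pvConflicts item.2.1 item.2.2.1 item.2.2.2 rest).length = rest.length := le_antisymm h h'
      rw [heq]; exact Prod.Lex.right _ (by omega)
end

-- ===== PORT B =====
abbrev PvBox := (Int × Int) × (Int × Int) × (Int × Int)

def pvClip (c0 c1 low high : Int) : Option (Int × Int) :=
  if c1 < low ∨ c0 > high then none
  else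
    let a := min (max c0 low) high
    let b := min (max c1 low) high
    if a > b then none else some (a, b)

def pvClipBox (lowx highx lowy highy lowz highz : Int)
    (it : Int × List Int × List Int × List Int) : Option PvBox :=
  match pvClip (pvFirst it.2.1) (pvLast it.2.1) lowx highx,
        pvClip (pvFirst it.2.2.1) (pvLast it.2.2.1) lowy highy,
        pvClip (pvFirst it.2.2.2) (pvLast it.2.2.2) lowz highz with
  | some bx, some bb, some bz => some (bx, bb, bz)
  | _, _, _ => none

def pvVol (b : PvBox) : Int :=
  (b.1.2 - b.1.1 + 1) * (b.2.1.2 - b.2.1.1 + 1) * (b.2.2.2 - b.2.2.1 + 1)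

def pvProperB (b : PvBox) : Bool :=
  decide (b.1.1 ≤ b.1.2 ∧ b.2.1.1 ≤ b.2.1.2 ∧ b.2.2.1 ≤ b.2.2.2)

-- disjoint pieces of box d lying outside box c
def pvSubtract (d c : PvBox) : List PvBox :=
  if d.1.2 < c.1.1 ∨ c.1.2 < d.1.1 ∨ d.2.1.2 < c.2.1.1 ∨ c.2.1.2 < d.2.1.1 ∨
     d.2.2.2 < c.2.2.1 ∨ c.2.2.2 < d.2.2.1 then [d]
  else
    let mx0 := max d.1.1 c.1.1
    let mx1 := min d.1.2 c.1.2
    let my0 := max d.2.1.1 c.2.1.1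
    let my1 := min d.2.1.2 c.2.1.2
    ([((d.1.1, c.1.1 - 1), d.2.1, d.2.2),
      ((c.1.2 + 1, d.1.2), d.2.1, d.2.2),
      ((mx0, mx1), (d.2.1.1, c.2.1.1 - 1), d.2.2),
      ((mx0, mx1), (c.2.1.2 + 1, d.2.1.2), d.2.2),
      ((mx0, mx1), (my0, my1), (d.2.2.1, c.2.2.1 - 1)),
      ((mx0, mx1), (my0, my1), (c.2.2.2 + 1, d.2.2.2))] : List PvBox).filter pvProperB

def pvAltStep (lowx highx lowy highy lowz highz : Int)
    (st : List PvBox × Int) (it : Int × List Int × List Int × List Int) : List PvBox × Int :=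
  match pvClipBox lowx highx lowy highy lowz highz it with
  | none => st
  | some c =>
    let frags := st.1.foldl (fun fs b => fs.flatMap (fun f => pvSubtract f b)) [c]
    (st.1 ++ frags, st.2 + (frags.map pvVol).sum)

def count_uninterrupted_alt (item : Int × List Int × List Int × List Int)
    (rest : List (Int × List Int × List Int × List Int)) : Int :=
  let total : Int := (item.2.1.length : Int) * (item.2.2.1.length : Int) * (item.2.2.2.length : Int)
  let st := rest.foldl
    (pvAltStep (pvFirst item.2.1) (pvLast item.2.1) (pvFirst item.2.2.1) (pvLast item.2.2.1)
      (pvFirst item.2.2.2) (pvLast item.2.2.2)) ([], 0)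
  total - st.2

-- ===== PRECONDITION & SPEC =====
-- Pre_ excludes empty coordinate lists (in the item or in any element of rest): there Python A
-- raises IndexError on xr[0]/xr[-1] whenever rest is nonempty, and on the degenerate rest = []
-- case A returns 0 lazily while B's up-front endpoint indexing raises IndexError itself.
def Pre_count_uninterrupted (item : Int × List Int × List Int × List Int) (rest : List (Int × List Int × List Int × List Int)) : Prop :=
  item.2.1 ≠ [] ∧ item.2.2.1 ≠ [] ∧ item.2.2.2 ≠ [] ∧
  ∀ it ∈ rest, it.2.1 ≠ [] ∧ it.2.2.1 ≠ [] ∧ it.2.2.2 ≠ []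
instance (item : Int × List Int × List Int × List Int) (rest : List (Int × List Int × List Int × List Int)) : Decidable (Pre_count_uninterrupted item rest) := by unfold Pre_count_uninterrupted; infer_instance

def pvWitness_count_uninterrupted : (Int × List Int × List Int × List Int) × (List (Int × List Int × List Int × List Int)) :=
  ((1, [0, 1, 2], [0, 1], [5]), [(0, [1, 2], [1], [4, 5, 6])])

def Spec_count_uninterrupted (item : Int × List Int × List Int × List Int) (rest : List (Int × List Int × List Int × List Int)) (out : Int) : Prop := out = count_uninterrupted_alt item rest
instance (item : Int × List Int × List Int × List Int) (rest : List (Int × List Int × List Int × List Int)) (out : Int) : Decidable (Spec_count_uninterrupted item rest out) := by unfold Spec_count_uninterrupted; infer_instance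

-- ===== CLAIM (what is proved, stated in full; the proofs are below) =====
def Claim_equal_count_uninterrupted : Prop := ∀ (item : Int × List Int × List Int × List Int) (rest : List (Int × List Int × List Int × List Int)), Dom_count_uninterrupted item rest → Pre_count_uninterrupted item rest → Spec_count_uninterrupted item rest (count_uninterrupted item rest)

-- ===== LEMMAS AND PROOFS =====

-- the set of integer points of a box
noncomputable def pvPts (b : PvBox) : Finset (Int × Int × Int) :=
  Finset.Icc b.1.1 b.1.2 ×ˢ (Finset.Icc b.2.1.1 b.2.1.2 ×ˢ Finset.Icc b.2.2.1 b.2.2.2)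

-- union of the point sets of a list of boxes
noncomputable def pvU (bs : List PvBox) : Finset (Int × Int × Int) :=
  bs.foldr (fun b s => pvPts b ∪ s) ∅

theorem mem_pvPts {b : PvBox} {p : Int × Int × Int} :
    p ∈ pvPts b ↔ (b.1.1 ≤ p.1 ∧ p.1 ≤ b.1.2) ∧ (b.2.1.1 ≤ p.2.1 ∧ p.2.1 ≤ b.2.1.2) ∧
      (b.2.2.1 ≤ p.2.2 ∧ p.2.2 ≤ b.2.2.2) := by
  simp [pvPts, Finset.mem_product, Finset.mem_Icc]

@[simp] theorem pvU_nil : pvU [] = ∅ := rfl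
@[simp] theorem pvU_cons {b : PvBox} {bs : List PvBox} : pvU (b :: bs) = pvPts b ∪ pvU bs := rfl

theorem pvU_append {as bs : List PvBox} : pvU (as ++ bs) = pvU as ∪ pvU bs := by
  induction as with
  | nil => simp
  | cons a as ih => simp [ih, Finset.union_assoc]

theorem mem_pvU {p : Int × Int × Int} {bs : List PvBox} :
    p ∈ pvU bs ↔ ∃ b ∈ bs, p ∈ pvPts b := by
  induction bs with
  | nil => simp
  | cons b bs ih => simp [ih]

theorem pvPts_subset_pvU {b : PvBox} {bs : List PvBox} (h : b ∈ bs) : pvPts b ⊆ pvU bs := by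
  intro p hp; exact mem_pvU.2 ⟨b, h, hp⟩

theorem disjoint_pvU_right {s : Finset (Int × Int × Int)} {bs : List PvBox}
    (h : ∀ b ∈ bs, Disjoint s (pvPts b)) : Disjoint s (pvU bs) := by
  rw [Finset.disjoint_left]
  intro p hp hq
  rcases mem_pvU.1 hq with ⟨b, hb, hpb⟩
  exact (Finset.disjoint_left.1 (h b hb)) hp hpb

theorem card_pvPts {b : PvBox} (h : pvProperB b = true) :
    ((pvPts b).card : Int) = pvVol b := by
  unfold pvProperB at h
  simp only [decide_eq_true_eq] at h
  simp only [pvPts, pvVol, Finset.card_product, Int.card_Icc]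
  push_cast
  rw [Int.toNat_of_nonneg (by omega : (0:Int) ≤ b.1.2 + 1 - b.1.1),
    Int.toNat_of_nonneg (by omega : (0:Int) ≤ b.2.1.2 + 1 - b.2.1.1),
    Int.toNat_of_nonneg (by omega : (0:Int) ≤ b.2.2.2 + 1 - b.2.2.1)]
  ring

-- pairwise-disjoint proper boxes: |union| = sum of volumes
theorem card_pvU_of_good {bs : List PvBox} (hp : ∀ b ∈ bs, pvProperB b = true)
    (hw : bs.Pairwise (fun a b => Disjoint (pvPts a) (pvPts b))) :
    ((pvU bs).card : Int) = (bs.map pvVol).sum := by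
  induction bs with
  | nil => simp
  | cons b bs ih =>
    rcases List.pairwise_cons.1 hw with ⟨hd, htl⟩
    have hdisj : Disjoint (pvPts b) (pvU bs) := disjoint_pvU_right hd
    simp only [pvU_cons, List.map_cons, List.sum_cons]
    rw [Finset.card_union_of_disjoint hdisj]
    push_cast
    rw [card_pvPts (hp b (by simp)), ih (fun x hx => hp x (by simp [hx])) htl]

-- ===== pvSubtract : pieces are proper, pairwise disjoint, and cover exactly d \ c =====
theorem pvSubtract_proper {d c : PvBox} (hd : pvProperB d = true) :
    ∀ p ∈ pvSubtract d c, pvProperB p = true := by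
  unfold pvSubtract
  split_ifs with h
  · intro p hp; simp at hp; subst hp; exact hd
  · intro p hp; exact (List.mem_filter.1 hp).2

theorem pvSubtract_union {d c : PvBox} (hd : pvProperB d = true) :
    pvU (pvSubtract d c) = pvPts d \ pvPts c := by
  unfold pvProperB at hd
  simp only [decide_eq_true_eq] at hd
  unfold pvSubtract
  split_ifs with h
  · ext p
    simp only [pvU_cons, pvU_nil, Finset.union_empty, Finset.mem_sdiff, mem_pvPts]
    omega
  · ext p
    rw [Finset.mem_sdiff, mem_pvU]
    simp only [List.mem_filter, List.mem_cons, List.not_mem_nil, or_false, pvProperB,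
      decide_eq_true_eq, mem_pvPts]
    constructor
    · rintro ⟨b, ⟨hb', hprop⟩, hpb⟩
      rcases hb' with rfl | rfl | rfl | rfl | rfl | rfl <;> simp_all <;> omega
    · rintro ⟨hpd, hpc⟩
      by_cases h1 : p.1 < c.1.1
      · refine ⟨((d.1.1, c.1.1 - 1), d.2.1, d.2.2), ⟨by simp, by simp; omega⟩, by simp; omega⟩
      by_cases h2 : c.1.2 < p.1
      · refine ⟨((c.1.2 + 1, d.1.2), d.2.1, d.2.2), ⟨by simp, by simp; omega⟩, by simp; omega⟩
      by_cases h3 : p.2.1 < c.2.1.1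
      · refine ⟨((max d.1.1 c.1.1, min d.1.2 c.1.2), (d.2.1.1, c.2.1.1 - 1), d.2.2),
          ⟨by simp, by simp; omega⟩, by simp; omega⟩
      by_cases h4 : c.2.1.2 < p.2.1
      · refine ⟨((max d.1.1 c.1.1, min d.1.2 c.1.2), (c.2.1.2 + 1, d.2.1.2), d.2.2),
          ⟨by simp, by simp; omega⟩, by simp; omega⟩
      by_cases h5 : p.2.2 < c.2.2.1
      · refine ⟨((max d.1.1 c.1.1, min d.1.2 c.1.2), (max d.2.1.1 c.2.1.1, min d.2.1.2 c.2.1.2),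
          (d.2.2.1, c.2.2.1 - 1)), ⟨by simp, by simp; omega⟩, by simp; omega⟩
      · refine ⟨((max d.1.1 c.1.1, min d.1.2 c.1.2), (max d.2.1.1 c.2.1.1, min d.2.1.2 c.2.1.2),
          (c.2.2.2 + 1, d.2.2.2)), ⟨by simp, by simp; omega⟩, by simp; omega⟩

theorem pvSubtract_pairwise {d c : PvBox} (hc : pvProperB c = true) :
    (pvSubtract d c).Pairwise (fun a b => Disjoint (pvPts a) (pvPts b)) := by
  unfold pvProperB at hc
  simp only [decide_eq_true_eq] at hc
  unfold pvSubtract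
  split_ifs with h
  · simp
  · refine List.Pairwise.filter _ ?_
    simp only [List.pairwise_cons, List.mem_cons, List.not_mem_nil, or_false]
    and_intros <;>
      first
        | exact List.Pairwise.nil
        | (rintro b (rfl | rfl | rfl | rfl | rfl | rfl) <;>
            (rw [Finset.disjoint_left]; intro p hp hq;
             rw [mem_pvPts] at hp hq; simp at hp hq; omega))

theorem pvFlatMap_subtract {fs : List PvBox} {b : PvBox} (hb : pvProperB b = true)
    (hp : ∀ f ∈ fs, pvProperB f = true)
    (hw : fs.Pairwise (fun a b => Disjoint (pvPts a) (pvPts b))) :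
    (∀ g ∈ fs.flatMap (fun f => pvSubtract f b), pvProperB g = true) ∧
    (fs.flatMap (fun f => pvSubtract f b)).Pairwise (fun a b => Disjoint (pvPts a) (pvPts b)) ∧
    pvU (fs.flatMap (fun f => pvSubtract f b)) = pvU fs \ pvPts b := by
  induction fs with
  | nil => simp
  | cons f fs ih =>
    rcases List.pairwise_cons.1 hw with ⟨hdisj, htl⟩
    have hf : pvProperB f = true := hp f (by simp)
    have hp' : ∀ f' ∈ fs, pvProperB f' = true := fun x hx => hp x (by simp [hx])
    rcases ih hp' htl with ⟨ihp, ihw, ihU⟩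
    have hsubU : pvU (pvSubtract f b) = pvPts f \ pvPts b := pvSubtract_union hf
    refine ⟨?_, ?_, ?_⟩
    · intro g hg
      rcases List.mem_flatMap.1 hg with ⟨f', hf', hg'⟩
      rcases List.mem_cons.1 hf' with rfl | hf''
      · exact pvSubtract_proper hf g hg'
      · exact pvSubtract_proper (hp' f' hf'') g hg'
    · rw [List.flatMap_cons, List.pairwise_append]
      refine ⟨pvSubtract_pairwise hb, ihw, ?_⟩
      intro a ha a' ha'
      have h1 : pvPts a ⊆ pvPts f := by
        refine subset_trans (pvPts_subset_pvU ha) ?_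
        rw [hsubU]; exact Finset.sdiff_subset
      have h2 : pvPts a' ⊆ pvU fs := by
        refine subset_trans (pvPts_subset_pvU ha') ?_
        rw [ihU]; exact Finset.sdiff_subset
      have h3 : Disjoint (pvPts f) (pvU fs) := disjoint_pvU_right hdisj
      exact Finset.disjoint_of_subset_left h1 (Finset.disjoint_of_subset_right h2 h3)
    · rw [List.flatMap_cons, pvU_append, hsubU, ihU, pvU_cons, Finset.union_sdiff_distrib]

theorem pvFoldl_subtract {cbs : List PvBox} (hcb : ∀ b ∈ cbs, pvProperB b = true) :
    ∀ fs : List PvBox, (∀ f ∈ fs, pvProperB f = true) →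
      fs.Pairwise (fun a b => Disjoint (pvPts a) (pvPts b)) →
      (∀ g ∈ cbs.foldl (fun fs b => fs.flatMap (fun f => pvSubtract f b)) fs, pvProperB g = true) ∧
      (cbs.foldl (fun fs b => fs.flatMap (fun f => pvSubtract f b)) fs).Pairwise
        (fun a b => Disjoint (pvPts a) (pvPts b)) ∧
      pvU (cbs.foldl (fun fs b => fs.flatMap (fun f => pvSubtract f b)) fs) = pvU fs \ pvU cbs := by
  induction cbs with
  | nil => intro fs hp hw; exact ⟨hp, hw, by simp⟩
  | cons b cbs ih =>
    intro fs hp hw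
    have hb : pvProperB b = true := hcb b (by simp)
    have hcb' : ∀ b' ∈ cbs, pvProperB b' = true := fun x hx => hcb x (by simp [hx])
    rcases pvFlatMap_subtract hb hp hw with ⟨h1, h2, h3⟩
    rcases ih hcb' _ h1 h2 with ⟨g1, g2, g3⟩
    refine ⟨g1, g2, ?_⟩
    have hrw : pvU fs \ pvU (b :: cbs) = (pvU fs \ pvPts b) \ pvU cbs := by
      rw [pvU_cons]; ext p; simp; tauto
    rw [hrw, ← h3]
    exact g3

-- ===== the B loop invariant =====
theorem pvClip_some_le {c0 c1 low high : Int} {p : Int × Int} (h : pvClip c0 c1 low high = some p) :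
    p.1 ≤ p.2 ∧ p.1 = min (max c0 low) high ∧ p.2 = min (max c1 low) high ∧
      ¬(c1 < low) ∧ ¬(c0 > high) := by
  simp only [pvClip, gt_iff_lt] at h
  split_ifs at h with h1 h2
  simp only [Option.some_inj] at h
  subst h
  refine ⟨?_, rfl, rfl, by omega, by omega⟩
  show min (max c0 low) high ≤ min (max c1 low) high
  omega

theorem pvClipBox_some_proper {lx hx ly hy lz hz : Int} {it : Int × List Int × List Int × List Int}
    {c : PvBox} (h : pvClipBox lx hx ly hy lz hz it = some c) : pvProperB c = true := by
  unfold pvClipBox at h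
  rcases h1 : pvClip (pvFirst it.2.1) (pvLast it.2.1) lx hx with _ | bx
  · rw [h1] at h; exact absurd h (by simp)
  rcases h2 : pvClip (pvFirst it.2.2.1) (pvLast it.2.2.1) ly hy with _ | bb
  · rw [h1, h2] at h; exact absurd h (by simp)
  rcases h3 : pvClip (pvFirst it.2.2.2) (pvLast it.2.2.2) lz hz with _ | bz
  · rw [h1, h2, h3] at h; exact absurd h (by simp)
  rw [h1, h2, h3] at h
  simp only [Option.some_inj] at h
  subst h
  have e1 := (pvClip_some_le h1).1
  have e2 := (pvClip_some_le h2).1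
  have e3 := (pvClip_some_le h3).1
  simp [pvProperB]
  omega

theorem pvAlt_unfold (item : Int × List Int × List Int × List Int)
    (rest : List (Int × List Int × List Int × List Int)) :
    count_uninterrupted_alt item rest
      = (item.2.1.length : Int) * (item.2.2.1.length : Int) * (item.2.2.2.length : Int)
        - (rest.foldl (pvAltStep (pvFirst item.2.1) (pvLast item.2.1) (pvFirst item.2.2.1)
            (pvLast item.2.2.1) (pvFirst item.2.2.2) (pvLast item.2.2.2)) ([], 0)).2 := by
  simp only [count_uninterrupted_alt]

theorem count_unfold (item : Int × List Int × List Int × List Int)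
    (rest : List (Int × List Int × List Int × List Int)) :
    count_uninterrupted item rest
      = (item.2.1.length : Int) * (item.2.2.1.length : Int) * (item.2.2.2.length : Int)
        - cuLoop (pvConflicts item.2.1 item.2.2.1 item.2.2.2 rest) := by
  simp only [count_uninterrupted]

theorem cuLoop_nil : cuLoop [] = 0 := by simp only [cuLoop]

theorem cuLoop_cons (c : Int × List Int × List Int × List Int)
    (cs : List (Int × List Int × List Int × List Int)) :
    cuLoop (c :: cs) = count_uninterrupted c cs + cuLoop cs := by simp only [cuLoop]

theorem pvAlt_loop (lx hx ly hy lz hz : Int) :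
    ∀ (rest : List (Int × List Int × List Int × List Int)) (cbs : List PvBox) (cov : Int),
      (∀ b ∈ cbs, pvProperB b = true) →
      cbs.Pairwise (fun a b => Disjoint (pvPts a) (pvPts b)) →
      cov = ((pvU cbs).card : Int) →
      pvU (rest.foldl (pvAltStep lx hx ly hy lz hz) (cbs, cov)).1
        = pvU cbs ∪ pvU (rest.filterMap (pvClipBox lx hx ly hy lz hz)) ∧
      (rest.foldl (pvAltStep lx hx ly hy lz hz) (cbs, cov)).2
        = ((pvU (rest.foldl (pvAltStep lx hx ly hy lz hz) (cbs, cov)).1).card : Int) := by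
  intro rest
  induction rest with
  | nil => intro cbs cov hp hw hc; exact ⟨by simp, by simpa using hc⟩
  | cons it rest ih =>
    intro cbs cov hp hw hc
    rcases h : pvClipBox lx hx ly hy lz hz it with _ | c
    · have hstep : pvAltStep lx hx ly hy lz hz (cbs, cov) it = (cbs, cov) := by
        simp [pvAltStep, h]
      rw [List.foldl_cons, hstep, List.filterMap_cons_none h]
      exact ih cbs cov hp hw hc
    · have hcprop : pvProperB c = true := pvClipBox_some_proper h
      rcases pvFoldl_subtract hp [c] (by simpa using hcprop) (by simp) with ⟨f1, f2, f3⟩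
      set frags := cbs.foldl (fun fs b => fs.flatMap (fun f => pvSubtract f b)) [c] with hfr
      have hfragU : pvU frags = pvPts c \ pvU cbs := by
        rw [f3]; simp
      have hdisj2 : Disjoint (pvU cbs) (pvU frags) := by
        rw [hfragU]; exact Finset.disjoint_sdiff
      have hstep : pvAltStep lx hx ly hy lz hz (cbs, cov) it
          = (cbs ++ frags, cov + (frags.map pvVol).sum) := by
        simp [pvAltStep, h, hfr]
      have hPP : ∀ b' ∈ cbs ++ frags, pvProperB b' = true := by
        intro b' hb'
        rcases List.mem_append.1 hb' with hb' | hb'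
        · exact hp b' hb'
        · exact f1 b' hb'
      have hPW : (cbs ++ frags).Pairwise (fun a b => Disjoint (pvPts a) (pvPts b)) := by
        rw [List.pairwise_append]
        refine ⟨hw, f2, ?_⟩
        intro a ha a' ha'
        have h1 : pvPts a ⊆ pvU cbs := pvPts_subset_pvU ha
        have h2 : pvPts a' ⊆ pvU frags := pvPts_subset_pvU ha'
        exact Finset.disjoint_of_subset_left h1 (Finset.disjoint_of_subset_right h2 hdisj2)
      have hcov' : cov + (frags.map pvVol).sum = ((pvU (cbs ++ frags)).card : Int) := by
        rw [pvU_append, Finset.card_union_of_disjoint hdisj2]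
        push_cast
        rw [hc, card_pvU_of_good f1 f2]
      rw [List.foldl_cons, hstep, List.filterMap_cons_some h]
      rcases ih (cbs ++ frags) _ hPP hPW hcov' with ⟨i3, i4⟩
      refine ⟨?_, i4⟩
      rw [i3, pvU_append, hfragU, Finset.union_sdiff_self_eq_union, pvU_cons,
        Finset.union_assoc]

theorem pvAlt_eq (item : Int × List Int × List Int × List Int)
    (rest : List (Int × List Int × List Int × List Int)) :
    count_uninterrupted_alt item rest
      = (item.2.1.length : Int) * (item.2.2.1.length : Int) * (item.2.2.2.length : Int)
        - ((pvU (rest.filterMap (pvClipBox (pvFirst item.2.1) (pvLast item.2.1)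
            (pvFirst item.2.2.1) (pvLast item.2.2.1)
            (pvFirst item.2.2.2) (pvLast item.2.2.2)))).card : Int) := by
  rw [pvAlt_unfold]
  rcases pvAlt_loop (pvFirst item.2.1) (pvLast item.2.1) (pvFirst item.2.2.1) (pvLast item.2.2.1)
      (pvFirst item.2.2.2) (pvLast item.2.2.2) rest [] 0 (by simp) (by simp) (by simp)
    with ⟨h3, h4⟩
  rw [h4, h3]
  simp

-- ===== the A recursion computes the same union cardinality =====
def pvRangeL (a b : Int) : List Int := PySem.List.pyRange a (b + 1) 1

def pvBoxOf (it : Int × List Int × List Int × List Int) : PvBox :=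
  ((pvFirst it.2.1, pvLast it.2.1), (pvFirst it.2.2.1, pvLast it.2.2.1),
   (pvFirst it.2.2.2, pvLast it.2.2.2))

-- items produced by A's first loop: three genuine integer ranges
def pvRItem (it : Int × List Int × List Int × List Int) : Prop :=
  ∃ bx : PvBox, pvProperB bx = true ∧ it.2.1 = pvRangeL bx.1.1 bx.1.2 ∧
    it.2.2.1 = pvRangeL bx.2.1.1 bx.2.1.2 ∧ it.2.2.2 = pvRangeL bx.2.2.1 bx.2.2.2

theorem pvFirst_rangeL {a b : Int} (h : a ≤ b) : pvFirst (pvRangeL a b) = a := by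
  unfold pvFirst pvRangeL
  rw [PySem.List.pyRange_one_cons (by omega), PySem.List.pyGet?_zero_cons]
  rfl

theorem pvLast_rangeL {a b : Int} (h : a ≤ b) : pvLast (pvRangeL a b) = b := by
  unfold pvLast pvRangeL
  rw [PySem.List.pyGet?_neg_one, PySem.List.pyRange_one_succ_right h, List.getLast?_concat]
  rfl

theorem length_rangeL {a b : Int} : (pvRangeL a b).length = (b + 1 - a).toNat :=
  PySem.List.length_pyRange_one a (b + 1)

theorem pvBoxOf_mk {s : Int} {bx : PvBox} (h : pvProperB bx = true) :
    pvBoxOf (s, pvRangeL bx.1.1 bx.1.2, pvRangeL bx.2.1.1 bx.2.1.2,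
      pvRangeL bx.2.2.1 bx.2.2.2) = bx := by
  unfold pvProperB at h
  simp only [decide_eq_true_eq] at h
  unfold pvBoxOf
  simp [pvFirst_rangeL h.1, pvLast_rangeL h.1, pvFirst_rangeL h.2.1, pvLast_rangeL h.2.1,
    pvFirst_rangeL h.2.2, pvLast_rangeL h.2.2]

theorem get_subrange_eq (cr : List Int) (low high : Int) :
    get_subrange cr low high =
      match pvClip (pvFirst cr) (pvLast cr) low high with
      | none => []
      | some p => pvRangeL p.1 p.2 := by
  unfold get_subrange pvClip pvRangeL
  by_cases h1 : pvLast cr < low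
  · simp [h1]
  by_cases h2 : pvFirst cr > high
  · simp [h1, h2]
  rw [if_neg h1, if_neg h2, if_neg (show ¬(pvLast cr < low ∨ pvFirst cr > high) by omega)]
  by_cases h3 : min (max (pvFirst cr) low) high > min (max (pvLast cr) low) high
  · rw [if_pos h3]
    exact PySem.List.pyRange_one_eq_nil (by omega)
  · rw [if_neg h3]

theorem toConflict_eq (xr yr zr : List Int) (it : Int × List Int × List Int × List Int) :
    toConflict xr yr zr it
      = (pvClipBox (pvFirst xr) (pvLast xr) (pvFirst yr) (pvLast yr) (pvFirst zr) (pvLast zr)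
          it).map
          (fun c => (it.1, pvRangeL c.1.1 c.1.2, pvRangeL c.2.1.1 c.2.1.2,
            pvRangeL c.2.2.1 c.2.2.2)) := by
  unfold toConflict pvClipBox
  rw [get_subrange_eq, get_subrange_eq, get_subrange_eq]
  rcases h1 : pvClip (pvFirst it.2.1) (pvLast it.2.1) (pvFirst xr) (pvLast xr) with _ | px
  · simp
  rcases h2 : pvClip (pvFirst it.2.2.1) (pvLast it.2.2.1) (pvFirst yr) (pvLast yr) with _ | py
  · simp [length_rangeL]
  rcases h3 : pvClip (pvFirst it.2.2.2) (pvLast it.2.2.2) (pvFirst zr) (pvLast zr) with _ | pz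
  · simp [length_rangeL]
  have e1 := (pvClip_some_le h1).1
  have e2 := (pvClip_some_le h2).1
  have e3 := (pvClip_some_le h3).1
  simp only [length_rangeL, Option.map_some]
  rw [if_neg (by simp [Int.toNat_eq_zero]; omega)]

theorem pvConflicts_map_boxOf (xr yr zr : List Int)
    (rest : List (Int × List Int × List Int × List Int)) :
    (pvConflicts xr yr zr rest).map pvBoxOf
      = rest.filterMap (pvClipBox (pvFirst xr) (pvLast xr) (pvFirst yr) (pvLast yr)
          (pvFirst zr) (pvLast zr)) := by
  unfold pvConflicts
  induction rest with
  | nil => rfl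
  | cons it rest ih =>
    rw [List.filterMap_cons, List.filterMap_cons, toConflict_eq]
    rcases h : pvClipBox (pvFirst xr) (pvLast xr) (pvFirst yr) (pvLast yr) (pvFirst zr)
        (pvLast zr) it with _ | c
    · simpa using ih
    · have hc : pvProperB c = true := pvClipBox_some_proper h
      simp only [Option.map_some]
      rw [List.map_cons, ih, pvBoxOf_mk hc]

theorem pvConflicts_RItem (xr yr zr : List Int)
    (rest : List (Int × List Int × List Int × List Int)) :
    ∀ c' ∈ pvConflicts xr yr zr rest, pvRItem c' := by
  intro c' hc'
  unfold pvConflicts at hc'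
  rcases List.mem_filterMap.1 hc' with ⟨it, hit, htc⟩
  rw [toConflict_eq] at htc
  rcases Option.map_eq_some_iff.1 htc with ⟨c, hco, rfl⟩
  exact ⟨c, pvClipBox_some_proper hco, rfl, rfl, rfl⟩

theorem pvClip_pts_none {c0 c1 low high : Int} (hcc : c0 ≤ c1) (hlh : low ≤ high)
    (h : pvClip c0 c1 low high = none) :
    ∀ x : Int, ¬(c0 ≤ x ∧ x ≤ c1 ∧ low ≤ x ∧ x ≤ high) := by
  simp only [pvClip, gt_iff_lt] at h
  split_ifs at h with h1 h2
  · intro x; omega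
  · intro x; omega

theorem pvClip_pts_some {c0 c1 low high : Int} {p : Int × Int} (hcc : c0 ≤ c1) (hlh : low ≤ high)
    (h : pvClip c0 c1 low high = some p) :
    ∀ x : Int, (p.1 ≤ x ∧ x ≤ p.2) ↔ (low ≤ x ∧ x ≤ high ∧ c0 ≤ x ∧ x ≤ c1) := by
  rcases pvClip_some_le h with ⟨hle, ha, hb, hn1, hn2⟩
  intro x
  omega

theorem pvClipBox_pts {t : PvBox} (ht : pvProperB t = true)
    {it : Int × List Int × List Int × List Int} (hR : pvRItem it) :
    (pvClipBox t.1.1 t.1.2 t.2.1.1 t.2.1.2 t.2.2.1 t.2.2.2 it = none →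
      pvPts t ∩ pvPts (pvBoxOf it) = ∅) ∧
    (∀ c, pvClipBox t.1.1 t.1.2 t.2.1.1 t.2.1.2 t.2.2.1 t.2.2.2 it = some c →
      pvPts c = pvPts t ∩ pvPts (pvBoxOf it)) := by
  obtain ⟨bx, hbx, e1, e2, e3⟩ := hR
  have hbox : pvBoxOf it = bx := by
    unfold pvProperB at hbx
    simp only [decide_eq_true_eq] at hbx
    unfold pvBoxOf
    rw [e1, e2, e3]
    simp [pvFirst_rangeL hbx.1, pvLast_rangeL hbx.1, pvFirst_rangeL hbx.2.1,
      pvLast_rangeL hbx.2.1, pvFirst_rangeL hbx.2.2, pvLast_rangeL hbx.2.2]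
  have hbx' : bx.1.1 ≤ bx.1.2 ∧ bx.2.1.1 ≤ bx.2.1.2 ∧ bx.2.2.1 ≤ bx.2.2.2 := by
    unfold pvProperB at hbx; simpa using hbx
  have ht' : t.1.1 ≤ t.1.2 ∧ t.2.1.1 ≤ t.2.1.2 ∧ t.2.2.1 ≤ t.2.2.2 := by
    unfold pvProperB at ht; simpa using ht
  have hfx : pvFirst it.2.1 = bx.1.1 := by rw [e1]; exact pvFirst_rangeL hbx'.1
  have hlx : pvLast it.2.1 = bx.1.2 := by rw [e1]; exact pvLast_rangeL hbx'.1
  have hfy : pvFirst it.2.2.1 = bx.2.1.1 := by rw [e2]; exact pvFirst_rangeL hbx'.2.1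
  have hly : pvLast it.2.2.1 = bx.2.1.2 := by rw [e2]; exact pvLast_rangeL hbx'.2.1
  have hfz : pvFirst it.2.2.2 = bx.2.2.1 := by rw [e3]; exact pvFirst_rangeL hbx'.2.2
  have hlz : pvLast it.2.2.2 = bx.2.2.2 := by rw [e3]; exact pvLast_rangeL hbx'.2.2
  rw [hbox]
  unfold pvClipBox
  rw [hfx, hlx, hfy, hly, hfz, hlz]
  constructor
  · intro h
    rcases h1 : pvClip bx.1.1 bx.1.2 t.1.1 t.1.2 with _ | px <;> rw [h1] at h
    · have := pvClip_pts_none hbx'.1 ht'.1 h1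
      ext p; simp only [Finset.mem_inter, mem_pvPts, Finset.notMem_empty, iff_false, not_and]
      intro hp1 hp2; have := this p.1; omega
    rcases h2 : pvClip bx.2.1.1 bx.2.1.2 t.2.1.1 t.2.1.2 with _ | py <;> rw [h2] at h
    · have := pvClip_pts_none hbx'.2.1 ht'.2.1 h2
      ext p; simp only [Finset.mem_inter, mem_pvPts, Finset.notMem_empty, iff_false, not_and]
      intro hp1 hp2; have := this p.2.1; omega
    rcases h3 : pvClip bx.2.2.1 bx.2.2.2 t.2.2.1 t.2.2.2 with _ | pz <;> rw [h3] at h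
    · have := pvClip_pts_none hbx'.2.2 ht'.2.2 h3
      ext p; simp only [Finset.mem_inter, mem_pvPts, Finset.notMem_empty, iff_false, not_and]
      intro hp1 hp2; have := this p.2.2; omega
    · exact absurd h (by simp)
  · intro c h
    rcases h1 : pvClip bx.1.1 bx.1.2 t.1.1 t.1.2 with _ | px
    · rw [h1] at h; exact absurd h (by simp)
    rcases h2 : pvClip bx.2.1.1 bx.2.1.2 t.2.1.1 t.2.1.2 with _ | py
    · rw [h1, h2] at h; exact absurd h (by simp)
    rcases h3 : pvClip bx.2.2.1 bx.2.2.2 t.2.2.1 t.2.2.2 with _ | pz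
    · rw [h1, h2, h3] at h; exact absurd h (by simp)
    rw [h1, h2, h3] at h
    simp only [Option.some_inj] at h
    subst h
    have hx := pvClip_pts_some hbx'.1 ht'.1 h1
    have hy := pvClip_pts_some hbx'.2.1 ht'.2.1 h2
    have hz := pvClip_pts_some hbx'.2.2 ht'.2.2 h3
    ext p
    simp only [Finset.mem_inter, mem_pvPts]
    have h1' := hx p.1
    have h2' := hy p.2.1
    have h3' := hz p.2.2
    omega

theorem pvU_filterMap_clip {t : PvBox} (ht : pvProperB t = true)
    (cs : List (Int × List Int × List Int × List Int)) (hR : ∀ c ∈ cs, pvRItem c) :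
    pvU (cs.filterMap (pvClipBox t.1.1 t.1.2 t.2.1.1 t.2.1.2 t.2.2.1 t.2.2.2))
      = pvPts t ∩ pvU (cs.map pvBoxOf) := by
  induction cs with
  | nil => simp
  | cons it cs ih =>
    have hRit : pvRItem it := hR it (by simp)
    have hR' : ∀ c ∈ cs, pvRItem c := fun x hx => hR x (by simp [hx])
    rcases pvClipBox_pts ht hRit with ⟨hn, hs⟩
    rw [List.map_cons, pvU_cons, Finset.inter_union_distrib_left, ← ih hR']
    rcases h : pvClipBox t.1.1 t.1.2 t.2.1.1 t.2.1.2 t.2.2.1 t.2.2.2 it with _ | c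
    · rw [List.filterMap_cons_none h, hn h]
      simp
    · rw [List.filterMap_cons_some h, pvU_cons, hs c h]

theorem pvTotal_RItem {it : Int × List Int × List Int × List Int} (hR : pvRItem it) :
    (it.2.1.length : Int) * (it.2.2.1.length : Int) * (it.2.2.2.length : Int)
      = ((pvPts (pvBoxOf it)).card : Int) := by
  obtain ⟨bx, hbx, e1, e2, e3⟩ := hR
  have hbx' : bx.1.1 ≤ bx.1.2 ∧ bx.2.1.1 ≤ bx.2.1.2 ∧ bx.2.2.1 ≤ bx.2.2.2 := by
    unfold pvProperB at hbx; simpa using hbx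
  have hbox : pvBoxOf it = bx := by
    unfold pvBoxOf
    rw [e1, e2, e3]
    simp [pvFirst_rangeL hbx'.1, pvLast_rangeL hbx'.1, pvFirst_rangeL hbx'.2.1,
      pvLast_rangeL hbx'.2.1, pvFirst_rangeL hbx'.2.2, pvLast_rangeL hbx'.2.2]
  rw [hbox, e1, e2, e3, card_pvPts hbx]
  simp only [length_rangeL]
  unfold pvVol
  push_cast [Int.toNat_of_nonneg (by omega : (0:Int) ≤ bx.1.2 + 1 - bx.1.1),
    Int.toNat_of_nonneg (by omega : (0:Int) ≤ bx.2.1.2 + 1 - bx.2.1.1),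
    Int.toNat_of_nonneg (by omega : (0:Int) ≤ bx.2.2.2 + 1 - bx.2.2.1)]
  ring

theorem cuLoop_eq : ∀ (n : Nat) (cs : List (Int × List Int × List Int × List Int)),
    cs.length ≤ n → (∀ c ∈ cs, pvRItem c) →
    cuLoop cs = ((pvU (cs.map pvBoxOf)).card : Int) := by
  intro n
  induction n with
  | zero =>
    intro cs h hR
    have : cs = [] := List.eq_nil_of_length_eq_zero (by omega)
    subst this
    simp [cuLoop_nil]
  | succ n ih =>
    intro cs hlen hR
    match cs with
    | [] => simp [cuLoop_nil]
    | c :: cs' =>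
      have hRc : pvRItem c := hR c (by simp)
      have hR' : ∀ x ∈ cs', pvRItem x := fun x hx => hR x (by simp [hx])
      obtain ⟨bx, hbx, e1, e2, e3⟩ := hRc
      have hbx' : bx.1.1 ≤ bx.1.2 ∧ bx.2.1.1 ≤ bx.2.1.2 ∧ bx.2.2.1 ≤ bx.2.2.2 := by
        unfold pvProperB at hbx; simpa using hbx
      have hbox : pvBoxOf c = bx := by
        unfold pvBoxOf
        rw [e1, e2, e3]
        simp [pvFirst_rangeL hbx'.1, pvLast_rangeL hbx'.1, pvFirst_rangeL hbx'.2.1,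
          pvLast_rangeL hbx'.2.1, pvFirst_rangeL hbx'.2.2, pvLast_rangeL hbx'.2.2]
      have hcount : count_uninterrupted c cs'
          = ((pvPts bx).card : Int) - ((pvPts bx ∩ pvU (cs'.map pvBoxOf)).card : Int) := by
        rw [count_unfold]
        have htot := pvTotal_RItem ⟨bx, hbx, e1, e2, e3⟩
        rw [hbox] at htot
        have hlen' : (pvConflicts c.2.1 c.2.2.1 c.2.2.2 cs').length ≤ n := by
          have := List.length_filterMap_le (toConflict c.2.1 c.2.2.1 c.2.2.2) cs'
          have : (pvConflicts c.2.1 c.2.2.1 c.2.2.2 cs').length ≤ cs'.length := this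
          simp at hlen
          omega
        rw [ih _ hlen' (pvConflicts_RItem c.2.1 c.2.2.1 c.2.2.2 cs'),
          pvConflicts_map_boxOf c.2.1 c.2.2.1 c.2.2.2 cs', htot]
        have hparams : pvFirst c.2.1 = bx.1.1 ∧ pvLast c.2.1 = bx.1.2 ∧
            pvFirst c.2.2.1 = bx.2.1.1 ∧ pvLast c.2.2.1 = bx.2.1.2 ∧
            pvFirst c.2.2.2 = bx.2.2.1 ∧ pvLast c.2.2.2 = bx.2.2.2 := by
          rw [e1, e2, e3]
          exact ⟨pvFirst_rangeL hbx'.1, pvLast_rangeL hbx'.1, pvFirst_rangeL hbx'.2.1,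
            pvLast_rangeL hbx'.2.1, pvFirst_rangeL hbx'.2.2, pvLast_rangeL hbx'.2.2⟩
        rw [hparams.1, hparams.2.1, hparams.2.2.1, hparams.2.2.2.1, hparams.2.2.2.2.1,
          hparams.2.2.2.2.2]
        rw [pvU_filterMap_clip hbx cs' hR']
      rw [cuLoop_cons, hcount, ih cs' (by simp at hlen; omega) hR', List.map_cons, pvU_cons, hbox]
      have hui := Finset.card_union_add_card_inter (pvPts bx) (pvU (cs'.map pvBoxOf))
      have hui' := congrArg (fun n : Nat => (n : Int)) hui
      push_cast at hui'
      omega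

theorem count_eq (item : Int × List Int × List Int × List Int)
    (rest : List (Int × List Int × List Int × List Int)) :
    count_uninterrupted item rest = count_uninterrupted_alt item rest := by
  rw [count_unfold, pvAlt_eq]
  congr 1
  rw [cuLoop_eq (pvConflicts item.2.1 item.2.2.1 item.2.2.2 rest).length _ le_rfl
      (pvConflicts_RItem item.2.1 item.2.2.1 item.2.2.2 rest),
    pvConflicts_map_boxOf item.2.1 item.2.2.1 item.2.2.2 rest]

theorem count_uninterrupted_spec : Claim_equal_count_uninterrupted := by
  intro item rest _ _
  exact count_eq item rest
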